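-- pv_equiv track=rewrite | github.com/robertcprice/nQPU | sdk/python/nqpu/chem/fermion.py | _bk_parity_set
-- ===== SOURCE A (Python) =====
-- def _bk_parity_set(j: int) -> set[int]:
--     """Compute the BK parity set P(j) -- qubits that store parity info for occupations < j."""
--     if j == 0:
--         return set()
--     result = set()
--     idx = j - 1
--     while idx >= 0:
--         result.add(idx)
--         # Move to child in Fenwick tree
--         if idx == 0:
--             break
--         idx = (idx & (idx + 1)) - 1
--         if idx < 0:
--             break
--     return result
-- ===== SOURCE B (Python) =====
-- def _bk_parity_set(j: int) -> set[int]: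
--     """Compute the BK parity set P(j) -- qubits that store parity info for occupations < j."""
--     if j <= 0:
--         return set()
--     result = set()
--     for k in range(j.bit_length()):
--         if (j >> k) & 1:
--             result.add(((j >> k) << k) - 1)
--     return result
-- ===== Notes on version B (the rewrite author's own statement) =====
-- stated objective: alternative
-- what changed: B derives each parity-set element directly from j's binary representation -- for every set bit k it adds ((j >> k) << k) - 1 in one pass over the bit positions -- instead of A's Fenwick-tree chain walk that repeatedly clears trailing bits of a running index.
import Mathlib
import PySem

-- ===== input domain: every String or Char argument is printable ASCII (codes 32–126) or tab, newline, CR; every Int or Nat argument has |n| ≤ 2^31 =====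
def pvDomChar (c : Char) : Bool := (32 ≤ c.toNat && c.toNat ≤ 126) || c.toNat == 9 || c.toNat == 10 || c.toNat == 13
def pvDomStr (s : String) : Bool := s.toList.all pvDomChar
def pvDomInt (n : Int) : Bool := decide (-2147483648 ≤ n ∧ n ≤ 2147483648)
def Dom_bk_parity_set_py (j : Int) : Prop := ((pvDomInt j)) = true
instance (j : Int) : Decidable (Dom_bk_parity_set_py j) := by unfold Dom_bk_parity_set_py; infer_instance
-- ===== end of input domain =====

-- B builds the set directly from the binary structure of j (one masked-prefix value per set bit,
-- low bit first) instead of A's Fenwick clear-trailing-bits chain walk; objective: alternative, same cost.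

-- ===== PORT A =====
-- termination helper for A's while-loop: the next index is strictly smaller
theorem pvGoA_dec (idx : Int) (h : 0 ≤ idx) (_h1 : ¬ idx = 0)
    (h2 : ¬ Int.land idx (idx + 1) - 1 < 0) :
    (Int.land idx (idx + 1) - 1).toNat < idx.toNat := by
  have hm : idx = ((idx.toNat : Nat) : Int) := (Int.toNat_of_nonneg h).symm
  have hland : Int.land ((idx.toNat : Nat) : Int) (((idx.toNat + 1 : Nat) : Nat) : Int)
      = ((idx.toNat &&& (idx.toNat + 1) : Nat) : Int) := rfl
  have hle : idx.toNat &&& (idx.toNat + 1) ≤ idx.toNat := Nat.and_le_left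
  rw [hm] at h2 ⊢
  have hc : ((idx.toNat : Nat) : Int) + 1 = (((idx.toNat + 1 : Nat) : Nat) : Int) := by push_cast; ring
  rw [hc, hland] at h2 ⊢
  omega

-- the while-loop of A: add idx, stop at idx == 0, step idx := (idx & (idx + 1)) - 1, stop if negative
def pvGoA (idx : Int) (acc : PySem.Set Int) : PySem.Set Int :=
  if h : 0 ≤ idx then
    let acc1 := PySem.Set.add acc idx
    if _h1 : idx = 0 then acc1
    else
      if h2 : Int.land idx (idx + 1) - 1 < 0 then acc1
      else pvGoA (Int.land idx (idx + 1) - 1) acc1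
  else acc
termination_by idx.toNat
decreasing_by exact pvGoA_dec idx h _h1 h2

def bk_parity_set_py (j : Int) : List Int :=
  if j = 0 then [] else pvGoA (j - 1) PySem.Set.empty

-- ===== PORT B =====
-- for k in range(j.bit_length()): if (j >> k) & 1: result.add(((j >> k) << k) - 1)
-- (in this branch j > 0, so bit-ops run on j.toNat; Nat.size n = n.bit_length() for n ≥ 0)
def bk_parity_set_py_alt (j : Int) : List Int :=
  if j ≤ 0 then [] else
    (List.range (Nat.size j.toNat)).foldl
      (fun acc k =>
        if (j.toNat >>> k) &&& 1 = 1 then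
          PySem.Set.add acc ((((j.toNat >>> k) <<< k : Nat) : Int) - 1)
        else acc)
      PySem.Set.empty

-- ===== PRECONDITION & SPEC =====
def Spec_bk_parity_set_py (j : Int) (out : List Int) : Prop := out = bk_parity_set_py_alt j
instance (j : Int) (out : List Int) : Decidable (Spec_bk_parity_set_py j out) := by unfold Spec_bk_parity_set_py; infer_instance

-- ===== CLAIM (what is proved, stated in full; the proofs are below) =====
def Claim_equal_bk_parity_set_py : Prop := ∀ (j : Int), Dom_bk_parity_set_py j → Spec_bk_parity_set_py j (bk_parity_set_py j)

-- ===== LEMMAS AND PROOFS =====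
def pvBits (n b : Nat) : List Int :=
  (List.range b).filterMap (fun k =>
    if (n >>> k) &&& 1 = 1 then some ((((n >>> k) <<< k : Nat) : Int) - 1) else none)

theorem pvBits_arith (n b : Nat) : pvBits n b =
    (List.range b).filterMap (fun k =>
      if (n / 2 ^ k) % 2 = 1 then some (((n / 2 ^ k * 2 ^ k : Nat) : Int) - 1) else none) := by
  simp [pvBits, Nat.shiftRight_eq_div_pow, Nat.shiftLeft_eq, Nat.and_one_is_mod]

theorem pvBits_tail (m b : Nat) (c : Nat) (hc : c ≤ 1) :
    (List.range b).filterMap ((fun k =>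
      if ((2 * m + c) / 2 ^ k) % 2 = 1 then some ((((2 * m + c) / 2 ^ k * 2 ^ k : Nat) : Int) - 1) else none) ∘ Nat.succ)
    = (pvBits m b).map (fun v => 2 * v + 1) := by
  rw [pvBits_arith, List.map_filterMap]
  apply List.filterMap_congr
  intro k _
  have hd : (2 * m + c) / 2 ^ (k + 1) = m / 2 ^ k := by
    rw [pow_succ', ← Nat.div_div_eq_div_mul]
    congr 1
    omega
  simp only [Function.comp_apply, Nat.succ_eq_add_one, hd]
  by_cases hb : (m / 2 ^ k) % 2 = 1
  · rw [if_pos hb, if_pos hb, Option.map_some]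
    congr 1
    have h2 : m / 2 ^ k * 2 ^ (k + 1) = 2 * (m / 2 ^ k * 2 ^ k) := by ring
    rw [h2]
    push_cast
    ring
  · rw [if_neg hb, if_neg hb, Option.map_none]

theorem pvBits_even (m b : Nat) :
    pvBits (2 * m) (b + 1) = (pvBits m b).map (fun v => 2 * v + 1) := by
  rw [pvBits_arith, List.range_succ_eq_map, List.filterMap_cons, List.filterMap_map]
  have h0 : ¬ ((2 * m + 0) / 2 ^ 0) % 2 = 1 := by simp [Nat.mul_mod_right]
  rw [show (2*m) = 2*m+0 from rfl]
  rw [if_neg h0]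
  exact pvBits_tail m b 0 (by omega)

theorem pvBits_odd (m b : Nat) :
    pvBits (2 * m + 1) (b + 1) = ((2 * m : Nat) : Int) :: (pvBits m b).map (fun v => 2 * v + 1) := by
  rw [pvBits_arith, List.range_succ_eq_map, List.filterMap_cons, List.filterMap_map]
  have h0 : ((2 * m + 1) / 2 ^ 0) % 2 = 1 := by simp
  rw [if_pos h0]
  show (((((2 * m + 1) / 2 ^ 0 * 2 ^ 0 : Nat) : Int) - 1) :: _) = _
  congr 1
  · have h1 : (2 * m + 1) / 2 ^ 0 * 2 ^ 0 = 2 * m + 1 := by simp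
    rw [h1]
    push_cast
    ring
  · exact pvBits_tail m b 1 (by omega)

def pvAddAll (acc : PySem.Set Int) (l : List Int) : PySem.Set Int := l.foldl PySem.Set.add acc

theorem pvAddAll_append (acc : PySem.Set Int) (l1 l2 : List Int) :
    pvAddAll acc (l1 ++ l2) = pvAddAll (pvAddAll acc l1) l2 := List.foldl_append

def pvSpine (n : Nat) : List Int :=
  if h : n = 0 then [] else ((n : Int) - 1) :: pvSpine (n &&& (n - 1))
termination_by n
decreasing_by
  have : n &&& (n - 1) ≤ n - 1 := Nat.and_le_right
  omega

theorem pvAnd_odd (m : Nat) : (2 * m + 1) &&& (2 * m) = 2 * m := by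
  apply Nat.eq_of_testBit_eq
  intro i
  rw [Nat.testBit_and]
  cases i with
  | zero => simp [Nat.testBit_zero]
  | succ i =>
      have h1 : (2 * m + 1) / 2 = m := by omega
      have h2 : (2 * m) / 2 = m := by omega
      simp [Nat.testBit_succ, h1, h2]

theorem pvAnd_even (m : Nat) : (2 * m) &&& (2 * m - 1) = 2 * (m &&& (m - 1)) := by
  apply Nat.eq_of_testBit_eq
  intro i
  rw [Nat.testBit_and]
  cases i with
  | zero => simp [Nat.testBit_zero]
  | succ i =>
      rw [Nat.testBit_succ, Nat.testBit_succ, Nat.testBit_succ, ← Nat.testBit_and]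
      have h1 : (2 * m) / 2 = m := by omega
      have h2 : (2 * m - 1) / 2 = m - 1 := by omega
      have h3 : (2 * (m &&& (m - 1))) / 2 = m &&& (m - 1) := by omega
      rw [h1, h2, h3]

theorem pvSpine_two_mul (m : Nat) : pvSpine (2 * m) = (pvSpine m).map (fun v => 2 * v + 1) := by
  induction m using Nat.strong_induction_on with
  | _ m ih =>
    by_cases hm : m = 0
    · subst hm; simp [pvSpine]
    · conv_lhs => rw [pvSpine]
      conv_rhs => rw [pvSpine]
      rw [dif_neg (by omega : ¬ 2 * m = 0), dif_neg hm, List.map_cons]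
      congr 1
      · push_cast; ring
      · rw [pvAnd_even m]
        exact ih (m &&& (m - 1)) (by have : m &&& (m - 1) ≤ m - 1 := Nat.and_le_right; omega)

theorem pvSpine_odd (m : Nat) :
    pvSpine (2 * m + 1) = ((2 * m : Nat) : Int) :: (pvSpine m).map (fun v => 2 * v + 1) := by
  rw [pvSpine]
  simp only [dif_neg (by omega : ¬ 2 * m + 1 = 0)]
  have h1 : 2 * m + 1 - 1 = 2 * m := by omega
  rw [h1, pvAnd_odd m, pvSpine_two_mul m]
  congr 1
  push_cast
  ring

theorem pvSize_odd (m : Nat) : Nat.size (2 * m + 1) = Nat.size m + 1 := by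
  by_cases hm : m = 0
  · subst hm; decide
  · apply le_antisymm
    · rw [Nat.size_le]
      calc 2 * m + 1 < 2 * 2 ^ m.size := by have := Nat.lt_size_self m; omega
        _ = 2 ^ (m.size + 1) := by ring
    · have h2 : 2 ^ (m.size - 1) ≤ m := Nat.lt_size.mp (by
        have : 0 < m.size := Nat.size_pos.mpr (by omega); omega)
      have : m.size < (2*m+1).size := Nat.lt_size.mpr (by
        have h4 : 2 ^ m.size = 2 * 2 ^ (m.size - 1) := by
          rw [← pow_succ']
          congr 1
          have : 0 < m.size := Nat.size_pos.mpr (by omega)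
          omega
        omega)
      omega

theorem pvSize_even (m : Nat) (hm : m ≠ 0) : Nat.size (2 * m) = Nat.size m + 1 := by
  have h : 2 * m = m <<< 1 := by simp [Nat.shiftLeft_eq]; ring
  rw [h, Nat.size_shiftLeft hm]

theorem pvBits_eq_spine (n : Nat) : pvBits n (Nat.size n) = pvSpine n := by
  induction n using Nat.strong_induction_on with
  | _ n ih =>
    by_cases hn : n = 0
    · subst hn
      rw [Nat.size_zero]
      simp [pvBits, pvSpine]
    · obtain ⟨m, hm⟩ : ∃ m, n = 2 * m ∨ n = 2 * m + 1 := ⟨n / 2, by omega⟩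
      rcases hm with hm | hm
      · have hm0 : m ≠ 0 := by omega
        rw [hm, pvSize_even m hm0, pvBits_even, ih m (by omega), pvSpine_two_mul]
      · rw [hm, pvSize_odd, pvBits_odd, ih m (by omega), pvSpine_odd]

theorem pvFoldB (n : Nat) (b : Nat) (acc : PySem.Set Int) :
    (List.range b).foldl
      (fun acc k =>
        if (n >>> k) &&& 1 = 1 then
          PySem.Set.add acc ((((n >>> k) <<< k : Nat) : Int) - 1)
        else acc) acc
    = pvAddAll acc (pvBits n b) := by
  induction b generalizing acc with
  | zero => rfl
  | succ b ih =>
      rw [List.range_succ, List.foldl_append, ih]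
      show (if (n >>> b) &&& 1 = 1 then
          PySem.Set.add (pvAddAll acc (pvBits n b)) ((((n >>> b) <<< b : Nat) : Int) - 1)
        else pvAddAll acc (pvBits n b)) = _
      unfold pvBits
      rw [List.range_succ, List.filterMap_append]
      rw [pvAddAll_append]
      by_cases hc : (n >>> b) &&& 1 = 1
      · rw [if_pos hc]
        simp only [List.filterMap_cons, List.filterMap_nil, if_pos hc]
        rfl
      · rw [if_neg hc]
        simp only [List.filterMap_cons, List.filterMap_nil, if_neg hc]
        rfl

theorem pvGoA_spine (n : Nat) (hn : 0 < n) (acc : PySem.Set Int) :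
    pvGoA ((n : Int) - 1) acc = pvAddAll acc (pvSpine n) := by
  induction n using Nat.strong_induction_on generalizing acc with
  | _ n ih =>
    rw [pvGoA]
    rw [dif_pos (by omega : (0:Int) ≤ (n : Int) - 1)]
    by_cases h1 : n = 1
    · subst h1
      norm_num
      rw [pvSpine]
      norm_num
      rw [pvSpine]
      simp [pvAddAll]
    · rw [dif_neg (by omega : ¬ ((n : Int) - 1 = 0))]
      have e2 : (n : Int) - 1 + 1 = (n : Int) := by ring
      have e1 : (n : Int) - 1 = ((n - 1 : Nat) : Int) := by push_cast [Nat.cast_sub (by omega : 1 ≤ n)]; ring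
      have hland : Int.land (((n - 1 : Nat) : Nat) : Int) ((n : Int))
          = (((n - 1) &&& n : Nat) : Int) := rfl
      have hcomm : (n - 1) &&& n = n &&& (n - 1) := Nat.and_comm _ _
      rw [e2, e1, hland, hcomm]
      set n' := n &&& (n - 1) with hn'
      have hle : n' ≤ n - 1 := Nat.and_le_right
      conv_rhs => rw [pvSpine]
      rw [dif_neg (by omega : ¬ n = 0)]
      rw [← hn']
      by_cases h0 : n' = 0
      · rw [dif_pos (by rw [h0]; norm_num : ((n' : Nat) : Int) - 1 < 0)]
        rw [h0, pvSpine]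
        simp [pvAddAll, e1]
      · rw [dif_neg (by omega : ¬ (((n' : Nat) : Int) - 1 < 0))]
        rw [ih n' (by omega) (by omega), e1]
        rfl

-- ===== VERDICT (by name: the statement is the Claim_ definition above) =====
theorem bk_parity_set_py_spec : Claim_equal_bk_parity_set_py := by
  intro j _
  unfold Spec_bk_parity_set_py bk_parity_set_py bk_parity_set_py_alt
  rcases lt_trichotomy j 0 with hj | hj | hj
  · rw [if_neg (by omega), if_pos (by omega)]
    rw [pvGoA]
    rw [dif_neg (by omega : ¬ (0:Int) ≤ j - 1)]
    rfl
  · subst hj; simp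
  · rw [if_neg (by omega), if_neg (by omega)]
    obtain ⟨n, hn⟩ : ∃ n : Nat, j = (n : Int) := ⟨j.toNat, (Int.toNat_of_nonneg (le_of_lt hj)).symm⟩
    subst hn
    have hn0 : 0 < n := by exact_mod_cast hj
    have htn : ((n : Int)).toNat = n := Int.toNat_natCast n
    rw [htn, pvFoldB n (Nat.size n) PySem.Set.empty, pvBits_eq_spine n,
      pvGoA_spine n hn0 PySem.Set.empty]
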